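-- pv_equiv track=rewrite | github.com/miseop25/Back_Jun_Code_Study | For_code_Test/Kakao/Test_2020/num_5.py | solution
-- ===== SOURCE A (Python) =====
-- def solution(stones, k):
--     answer = 0
--
--     while True :
--         cnt = 1
--         for i in range(len(stones)):
--             if stones[i] != 0 :
--                 stones[i] -=1
--                 cnt = 1
--             else :
--                 cnt += 1
--             if cnt > k :
--                 break
--         if cnt > k :
--             break
--         else :
--             answer +=1
--     return answer
-- ===== SOURCE B (Python) =====
-- def solution(stones, k):
--     def feasible(t):
--         # is there a run of k consecutive stones whose values all lie in [0, t]?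
--         run = 0
--         for v in stones:
--             run = run + 1 if 0 <= v <= t else 0
--             if run >= k:
--                 return True
--         return k <= 0
--
--     hi = 0
--     for v in stones:
--         if v > hi:
--             hi = v
--     lo = 0
--     while lo < hi:
--         mid = (lo + hi) // 2
--         if feasible(mid):
--             hi = mid
--         else:
--             lo = mid + 1
--     return lo
-- ===== Notes on version B (the rewrite author's own statement) =====
-- stated objective: alternative
-- what changed: A simulates the crossing pass by pass, decrementing every nonzero stone and rescanning until k consecutive zeros appear (mutating stones); B binary-searches the answer t and checks feasibility with one linear scan for a run of k consecutive values in [0,t], without mutating stones.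
import Mathlib
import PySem

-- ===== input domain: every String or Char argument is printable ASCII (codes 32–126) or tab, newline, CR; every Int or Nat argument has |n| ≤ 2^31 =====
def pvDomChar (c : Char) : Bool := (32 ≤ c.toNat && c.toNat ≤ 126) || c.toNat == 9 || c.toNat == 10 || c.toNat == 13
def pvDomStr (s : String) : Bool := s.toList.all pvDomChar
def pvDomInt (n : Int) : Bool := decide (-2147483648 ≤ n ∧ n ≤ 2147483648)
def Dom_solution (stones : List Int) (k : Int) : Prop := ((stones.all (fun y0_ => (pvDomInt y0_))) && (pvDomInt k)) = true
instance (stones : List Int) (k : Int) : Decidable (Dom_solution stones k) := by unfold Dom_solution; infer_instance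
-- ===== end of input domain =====

-- B replaces A's pass-by-pass simulation by a binary search on the answer with a linear
-- feasibility scan; equivalence is about the return value only: Python A mutates `stones`
-- in place, B does not.

-- ===== PORT A =====
-- the inner `for i in range(len(stones))` loop: scans, decrements nonzero stones, counts
-- `cnt`, breaks when cnt > k; returns (stones after the pass, final cnt)
def passA (k : Int) : List Int → Int → (List Int × Int)
  | [], cnt => ([], cnt)
  | s :: rest, cnt =>
    let sc := if s ≠ 0 then (s - 1, (1 : Int)) else (s, cnt + 1)
    if sc.2 > k then (sc.1 :: rest, sc.2)
    else
      let rc := passA k rest sc.2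
      (sc.1 :: rc.1, rc.2)

-- the `while True` loop; Python has no fuel: the fuel below is an upper bound on the number
-- of passes actually used whenever A terminates (see Pre_solution), so the port computes
-- exactly what A computes on every input A returns on
def loopA (k : Int) : Nat → List Int → Int → Int
  | 0, _, answer => answer
  | fuel + 1, stones, answer =>
    let pc := passA k stones 1
    if pc.2 > k then answer else loopA k fuel pc.1 (answer + 1)

def solution (stones : List Int) (k : Int) : Int :=
  loopA k (stones.foldl (fun a v => a + v.natAbs) 1) stones 0

-- ===== PORT B =====
-- B's `feasible(t)`: is there a run of k consecutive stones with values all in [0, t]?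
def feasGo (k t : Int) : List Int → Int → Bool
  | [], _ => decide (k ≤ 0)
  | v :: rest, run =>
    let run' := if 0 ≤ v ∧ v ≤ t then run + 1 else 0
    if run' ≥ k then true else feasGo k t rest run'

def feasB (stones : List Int) (k t : Int) : Bool := feasGo k t stones 0

-- B's `hi = 0; for v in stones: if v > hi: hi = v`
def hiB (stones : List Int) : Int := stones.foldl (fun a v => if v > a then v else a) 0

-- B's `while lo < hi` binary search; the gap shrinks every iteration, so hi+1 fuel suffices
def bgo (stones : List Int) (k : Int) : Nat → Int → Int → Int
  | 0, lo, _ => lo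
  | fuel + 1, lo, hi =>
    if lo < hi then
      let mid := PySem.Int.floordiv (lo + hi) 2
      if feasB stones k mid then bgo stones k fuel lo mid
      else bgo stones k fuel (mid + 1) hi
    else lo

def solution_alt (stones : List Int) (k : Int) : Int :=
  bgo stones k ((hiB stones).toNat + 1) 0 (hiB stones)

-- ===== PRECONDITION & SPEC =====
-- Pre_ excludes exactly the inputs on which A never returns: for k > 0 with no window of k
-- consecutive nonnegative stones (negative stones never reach 0), A's `while True` loops forever.
def Pre_solution (stones : List Int) (k : Int) : Prop :=
  k ≤ 0 ∨ ∃ i < stones.length + 1,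
    i + k.toNat ≤ stones.length ∧ ∀ j < k.toNat, 0 ≤ stones.getD (i + j) 0
instance (stones : List Int) (k : Int) : Decidable (Pre_solution stones k) := by
  unfold Pre_solution; infer_instance

def pvWitness_solution : List Int × Int := ([2, 1, 2], 1)

def Spec_solution (stones : List Int) (k : Int) (out : Int) : Prop := out = solution_alt stones k
instance (stones : List Int) (k : Int) (out : Int) : Decidable (Spec_solution stones k out) := by unfold Spec_solution; infer_instance

-- ===== CLAIM (what is proved, stated in full; the proofs are below) =====
def Claim_equal_solution : Prop := ∀ (stones : List Int) (k : Int), Dom_solution stones k → Pre_solution stones k → Spec_solution stones k (solution stones k)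

-- ===== LEMMAS AND PROOFS =====

-- one Python pass decrements every nonzero stone: elementwise effect
def fA (v : Int) : Int := if v ≠ 0 then v - 1 else v

theorem fA_iter_neg (t : Nat) : ∀ v : Int, v < 0 → fA^[t] v = v - t := by
  induction t with
  | zero => intro v _; simp
  | succ t ih =>
    intro v hv
    rw [Function.iterate_succ_apply]
    have h1 : fA v = v - 1 := by simp [fA]; omega
    rw [h1, ih _ (by omega)]; push_cast; ring

theorem fA_iter_nonneg (t : Nat) : ∀ v : Int, 0 ≤ v → fA^[t] v = max (v - t) 0 := by
  induction t with
  | zero => intro v hv; simp; omega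
  | succ t ih =>
    intro v hv
    rw [Function.iterate_succ_apply]
    by_cases h0 : v = 0
    · subst h0; simp [fA]; rw [ih 0 le_rfl]; omega
    · have h1 : fA v = v - 1 := by simp [fA, h0]
      rw [h1, ih _ (by omega)]; push_cast; omega

theorem fA_iter_zero_iff (t : Nat) (v : Int) : fA^[t] v = 0 ↔ (0 ≤ v ∧ v ≤ (t : Int)) := by
  by_cases hv : 0 ≤ v
  · rw [fA_iter_nonneg t v hv]; omega
  · rw [fA_iter_neg t v (by omega)]; omega

-- break of A's inner pass on the t-times-decremented stones ↔ B's feasibility scan at t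
theorem pass_iff (k : Int) (t : Nat) : ∀ (xs : List Int) (run : Int), 0 ≤ run →
    (run < k ∨ k ≤ 0) →
    ((passA k (xs.map (fun v => fA^[t] v)) (run + 1)).2 > k ↔ feasGo k (t : Int) xs run = true) := by
  intro xs
  induction xs with
  | nil =>
    intro run h0 hk
    simp only [List.map_nil, passA, feasGo, decide_eq_true_eq]
    omega
  | cons v rest ih =>
    intro run h0 hk
    simp only [List.map_cons, passA, feasGo]
    by_cases hz : 0 ≤ v ∧ v ≤ (t : Int)
    · have hz' : fA^[t] v = 0 := (fA_iter_zero_iff t v).mpr hz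
      simp only [hz', if_pos hz, ne_eq, not_true_eq_false, if_false]
      by_cases hb : run + 1 + 1 > k
      · rw [if_pos hb, if_pos (by omega : run + 1 ≥ k)]
        simpa using hb
      · rw [if_neg hb, if_neg (by omega : ¬ run + 1 ≥ k)]
        exact ih (run + 1) (by omega) (by omega)
    · have hz' : fA^[t] v ≠ 0 := fun h => hz ((fA_iter_zero_iff t v).mp h)
      simp only [hz', if_neg hz, ne_eq, not_false_eq_true, if_true]
      by_cases hb : (1 : Int) > k
      · rw [if_pos hb, if_pos (by omega : (0 : Int) ≥ k)]
        simpa using hb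
      · rw [if_neg hb, if_neg (by omega : ¬ (0 : Int) ≥ k)]
        exact ih 0 le_rfl (by omega)

-- a pass that does not break maps every stone by fA
theorem pass_map (k : Int) : ∀ (xs : List Int) (cnt : Int),
    ¬((passA k xs cnt).2 > k) → (passA k xs cnt).1 = xs.map fA := by
  intro xs
  induction xs with
  | nil => intro cnt _; simp [passA]
  | cons v rest ih =>
    intro cnt hnb
    simp only [passA] at hnb ⊢
    by_cases hv : v ≠ 0
    · simp only [if_pos hv] at hnb ⊢
      by_cases hb : (1 : Int) > k
      · rw [if_pos hb] at hnb; exact absurd hb hnb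
      · rw [if_neg hb] at hnb ⊢
        rw [List.map_cons, ih 1 hnb]
        simp [fA, hv]
    · simp only [if_neg hv] at hnb ⊢
      by_cases hb : cnt + 1 > k
      · rw [if_pos hb] at hnb; exact absurd hb hnb
      · rw [if_neg hb] at hnb ⊢
        rw [List.map_cons, ih (cnt + 1) hnb]
        simp only [ne_eq, not_not] at hv
        simp [fA, hv]

-- feasibility is monotone in t (and in the carried run)
theorem feasGo_mono (k : Int) : ∀ (xs : List Int) (t t' run run' : Int), t ≤ t' → 0 ≤ run →
    run ≤ run' → feasGo k t xs run = true → feasGo k t' xs run' = true := by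
  intro xs
  induction xs with
  | nil => intro t t' run run' _ _ _ h; simpa [feasGo] using h
  | cons v rest ih =>
    intro t t' run run' ht h0 hr h
    simp only [feasGo] at h ⊢
    by_cases hz : 0 ≤ v ∧ v ≤ t
    · have hz' : 0 ≤ v ∧ v ≤ t' := ⟨hz.1, le_trans hz.2 ht⟩
      rw [if_pos hz] at h
      rw [if_pos hz']
      by_cases hb : run + 1 ≥ k
      · rw [if_pos (by omega : run' + 1 ≥ k)]
      · rw [if_neg hb] at h
        by_cases hb' : run' + 1 ≥ k
        · rw [if_pos hb']
        · rw [if_neg hb']; exact ih t t' (run + 1) (run' + 1) ht (by omega) (by omega) h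
    · rw [if_neg hz] at h
      by_cases hz' : 0 ≤ v ∧ v ≤ t'
      · rw [if_pos hz']
        by_cases hb : (0 : Int) ≥ k
        · rw [if_pos (by omega : run' + 1 ≥ k)]
        · rw [if_neg hb] at h
          by_cases hb' : run' + 1 ≥ k
          · rw [if_pos hb']
          · rw [if_neg hb']; exact ih t t' 0 (run' + 1) ht le_rfl (by omega) h
      · rw [if_neg hz']
        by_cases hb : (0 : Int) ≥ k
        · rw [if_pos hb] at h ⊢
        · rw [if_neg hb] at h ⊢; exact ih t t' 0 0 ht le_rfl le_rfl h

theorem feasGo_k_nonpos (k t : Int) (hk : k ≤ 0) :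
    ∀ (xs : List Int) (run : Int), feasGo k t xs run = true := by
  intro xs
  induction xs with
  | nil => intro run; simp [feasGo]; omega
  | cons v rest ih =>
    intro run
    simp only [feasGo]
    by_cases hz : 0 ≤ v ∧ v ≤ t
    · rw [if_pos hz]
      by_cases hb : run + 1 ≥ k
      · rw [if_pos hb]
      · rw [if_neg hb]; exact ih _
    · rw [if_neg hz, if_pos (by omega : (0 : Int) ≥ k)]

-- a full in-range prefix of length ≥ k - run forces the scan to succeed
theorem feasGo_prefix (k t : Int) : ∀ (m : Nat) (xs : List Int) (run : Int), 0 ≤ run →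
    run < k → k ≤ run + (m : Int) → m ≤ xs.length →
    (∀ j < m, 0 ≤ xs.getD j 0 ∧ xs.getD j 0 ≤ t) → feasGo k t xs run = true := by
  intro m
  induction m with
  | zero => intro xs run h0 h1 h2 _ _; push_cast at h2; omega
  | succ m ih =>
    intro xs run h0 h1 h2 hlen hw
    match xs with
    | [] => simp at hlen
    | v :: rest =>
      have hv : 0 ≤ v ∧ v ≤ t := by simpa using hw 0 (Nat.succ_pos m)
      simp only [feasGo, if_pos hv]
      by_cases hb : run + 1 ≥ k
      · rw [if_pos hb]
      · rw [if_neg hb]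
        refine ih rest (run + 1) (by omega) (by omega) (by push_cast at h2 ⊢; omega)
          (by simpa using hlen) ?_
        intro j hj
        simpa using hw (j + 1) (by omega)

-- an in-range window anywhere forces the scan to succeed
theorem feasGo_window (k t : Int) (hk : 0 < k) : ∀ (xs : List Int) (i : Nat) (run : Int),
    0 ≤ run → run < k → i + k.toNat ≤ xs.length →
    (∀ j < k.toNat, 0 ≤ xs.getD (i + j) 0 ∧ xs.getD (i + j) 0 ≤ t) →
    feasGo k t xs run = true := by
  intro xs
  induction xs with
  | nil => intro i run _ _ hlen _; simp at hlen; omega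
  | cons v rest ih =>
    intro i run h0 h1 hlen hw
    match i with
    | 0 =>
      refine feasGo_prefix k t k.toNat (v :: rest) run h0 h1 (by omega) (by simpa using hlen) ?_
      intro j hj; simpa using hw j hj
    | i + 1 =>
      simp only [feasGo]
      by_cases hz : 0 ≤ v ∧ v ≤ t
      · rw [if_pos hz]
        by_cases hb : run + 1 ≥ k
        · rw [if_pos hb]
        · rw [if_neg hb]
          refine ih i (run + 1) (by omega) (by omega) (by simp only [List.length_cons] at hlen; omega) ?_
          intro j hj
          have := hw j hj
          simpa [Nat.succ_add] using this
      · rw [if_neg hz]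
        by_cases hb : (0 : Int) ≥ k
        · rw [if_pos hb]
        · rw [if_neg hb]
          refine ih i 0 le_rfl (by omega) (by simp only [List.length_cons] at hlen; omega) ?_
          intro j hj
          have := hw j hj
          simpa [Nat.succ_add] using this

-- hiB bounds
theorem le_foldl_max : ∀ (xs : List Int) (a : Int),
    a ≤ xs.foldl (fun b v => if v > b then v else b) a := by
  intro xs
  induction xs with
  | nil => intro a; simp
  | cons v rest ih =>
    intro a
    simp only [List.foldl_cons]
    calc a ≤ if v > a then v else a := by split_ifs <;> omega
    _ ≤ _ := ih _

theorem mem_le_foldl_max : ∀ (xs : List Int) (a v : Int), v ∈ xs →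
    v ≤ xs.foldl (fun b w => if w > b then w else b) a := by
  intro xs
  induction xs with
  | nil => intro a v h; simp at h
  | cons w rest ih =>
    intro a v h
    simp only [List.foldl_cons]
    rcases List.mem_cons.mp h with h | h
    · subst h
      calc v ≤ if v > a then v else a := by split_ifs <;> omega
      _ ≤ _ := le_foldl_max _ _
    · exact ih _ v h

theorem hiB_nonneg (stones : List Int) : 0 ≤ hiB stones := le_foldl_max stones 0

theorem hiB_lt_fuelA : ∀ (xs : List Int) (a : Int) (b : Nat), 0 ≤ a → a.toNat < b →
    (xs.foldl (fun b v => if v > b then v else b) a).toNat < xs.foldl (fun a v => a + v.natAbs) b := by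
  intro xs
  induction xs with
  | nil => intro a b _ h; simpa using h
  | cons v rest ih =>
    intro a b h0 h
    simp only [List.foldl_cons]
    apply ih
    · split_ifs <;> omega
    · split_ifs <;> omega

-- A's while loop counts passes up to the least feasible t
theorem loopA_eq (stones : List Int) (k : Int) (N : Nat)
    (hN : ∀ t : Int, 0 ≤ t → (feasB stones k t = true ↔ (N : Int) ≤ t)) :
    ∀ (fuel t : Nat) (a : Int), t ≤ N → N - t < fuel →
      loopA k fuel (stones.map (fun v => fA^[t] v)) a = a + ((N : Int) - (t : Int)) := by
  intro fuel
  induction fuel with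
  | zero => intro t a h1 h2; omega
  | succ fuel ih =>
    intro t a h1 h2
    simp only [loopA]
    have hiff := pass_iff k t stones 0 le_rfl (by omega)
    simp only [zero_add] at hiff
    have hfeas : feasGo k (t : Int) stones 0 = feasB stones k (t : Int) := rfl
    by_cases hbr : (passA k (stones.map (fun v => fA^[t] v)) 1).2 > k
    · rw [if_pos hbr]
      have : feasB stones k (t : Int) = true := by rw [← hfeas]; exact hiff.mp hbr
      have hNt : (N : Int) ≤ t := (hN (t : Int) (by omega)).mp this
      have htN : (t : Int) = (N : Int) := by omega
      rw [htN]; ring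
    · rw [if_neg hbr]
      have hmap : (passA k (stones.map (fun v => fA^[t] v)) 1).1
          = (stones.map (fun v => fA^[t] v)).map fA := pass_map k _ 1 hbr
      have hlt : t < N := by
        by_contra hcon
        exact hbr (hiff.mpr ((hN (t : Int) (by omega)).mpr (by omega)))
      rw [hmap, List.map_map]
      have : (fA ∘ fun v => fA^[t] v) = fun v => fA^[t + 1] v := by
        funext v
        simp [Function.iterate_succ_apply']
      rw [this, ih (t + 1) (a + 1) (by omega) (by omega)]
      push_cast; ring

-- B's binary search converges to the least feasible t
theorem bgo_eq (stones : List Int) (k : Int) (N : Nat)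
    (hN : ∀ t : Int, 0 ≤ t → (feasB stones k t = true ↔ (N : Int) ≤ t)) :
    ∀ (fuel : Nat) (lo hi : Int), 0 ≤ lo → lo ≤ (N : Int) → (N : Int) ≤ hi →
      (hi - lo).toNat ≤ fuel → bgo stones k fuel lo hi = (N : Int) := by
  intro fuel
  induction fuel with
  | zero =>
    intro lo hi h0 h1 h2 h3
    simp only [bgo]
    omega
  | succ fuel ih =>
    intro lo hi h0 h1 h2 h3
    simp only [bgo]
    by_cases hlh : lo < hi
    · rw [if_pos hlh]
      have hmid := PySem.Int.floordiv_two_mid_bounds (le_of_lt hlh)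
      have hmid2 : PySem.Int.floordiv (lo + hi) 2 < hi := by
        have := PySem.Int.floordiv_eq_ediv_of_pos (a := lo + hi) (b := 2) (by omega)
        omega
      set mid := PySem.Int.floordiv (lo + hi) 2 with hmiddef
      by_cases hf : feasB stones k mid = true
      · rw [if_pos hf]
        have : (N : Int) ≤ mid := (hN mid (by omega)).mp hf
        exact ih lo mid h0 h1 this (by omega)
      · rw [if_neg hf]
        have : ¬ ((N : Int) ≤ mid) := fun h => hf ((hN mid (by omega)).mpr h)
        exact ih (mid + 1) hi (by omega) (by omega) h2 (by omega)
    · rw [if_neg hlh]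
      omega

theorem solution_eq_of_feas (stones : List Int) (k : Int)
    (hex : feasB stones k (hiB stones) = true) :
    solution stones k = solution_alt stones k := by
  have hhi : 0 ≤ hiB stones := hiB_nonneg stones
  have hexN : ∃ n : Nat, feasB stones k (n : Int) = true :=
    ⟨(hiB stones).toNat, by rwa [Int.toNat_of_nonneg hhi]⟩
  set N := Nat.find hexN with hNdef
  have hN : ∀ t : Int, 0 ≤ t → (feasB stones k t = true ↔ (N : Int) ≤ t) := by
    intro t ht
    constructor
    · intro h
      have : feasB stones k ((t.toNat : Nat) : Int) = true := by
        rwa [Int.toNat_of_nonneg ht]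
      have := Nat.find_min' hexN this
      omega
    · intro h
      have hNf : feasB stones k ((N : Nat) : Int) = true := Nat.find_spec hexN
      exact feasGo_mono k stones ((N : Nat) : Int) t 0 0 h le_rfl le_rfl hNf
  have hNle : (N : Int) ≤ hiB stones := (hN (hiB stones) hhi).mp hex
  -- A side
  have hA : solution stones k = (N : Int) := by
    have hmap0 : stones.map (fun v => fA^[0] v) = stones := by simp
    have hfuel : N - 0 < stones.foldl (fun a v => a + v.natAbs) 1 := by
      have h2 := hiB_lt_fuelA stones 0 1 le_rfl (by norm_num)
      have h3 := hiB_nonneg stones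
      unfold hiB at hNle h3
      omega
    have hL := loopA_eq stones k N hN (stones.foldl (fun a v => a + v.natAbs) 1) 0 0
      (Nat.zero_le N) hfuel
    rw [hmap0] at hL
    unfold solution
    rw [hL]
    push_cast
    ring
  -- B side
  have hB : solution_alt stones k = (N : Int) := by
    unfold solution_alt
    exact bgo_eq stones k N hN _ 0 (hiB stones) le_rfl (by omega) hNle (by omega)
  rw [hA, hB]

-- ===== VERDICT (by name: the statement is the Claim_ definition above) =====
theorem solution_spec : Claim_equal_solution := by
  intro stones k _ hpre
  unfold Spec_solution
  refine solution_eq_of_feas stones k ?_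
  by_cases hk0 : k ≤ 0
  · exact feasGo_k_nonpos k _ hk0 stones 0
  · rcases hpre with hk | ⟨i, _, hfit, hw⟩
    · exact absurd hk hk0
    · refine feasGo_window k (hiB stones) (by omega) stones i 0 le_rfl (by omega) hfit ?_
      intro j hj
      have hidx : i + j < stones.length := by omega
      refine ⟨(hw j hj), ?_⟩
      have : stones.getD (i + j) 0 = stones[i + j] := List.getD_eq_getElem stones 0 hidx
      rw [this]
      exact mem_le_foldl_max stones 0 _ (List.getElem_mem hidx)
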